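-- pv_equiv track=rewrite | github.com/nisheshawale/Major_Project_final | Major-Project/Text Similarity/text_alignment/s_bert.py | frag_founder
-- ===== SOURCE A (Python) =====
-- def adjacent_sents(a, b, th):
--     """
--     DESCRIPTION: Define if two sentences are adjacent measured in sentences
--     INPUT: a <int> - Sentence a index,
--            b <int> - Sentence b index
--            th <int> - maximum gap between indexes
--     OUTPUT: True if the two sentences are adjacents, False otherwise
--     """
--     if abs(a - b) - 1 <= th:
--         return True
--     else:
--         return False
--
-- def frag_founder(ps, src_offsets, susp_offsets, src_gap, susp_gap, src_size, susp_size, side):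
--     """
--     DESCRIPTION: Form clusters by grouping "adjacent" sentences in a given side (source o suspicious)
--     INPUT: ps <list of tuples (int, int)> - Seeds
--            src_offsets <list of tuples (int, int)> - Contain the char offset and length of each source document sentence
--            susp_offsets <list of tuples (int, int)> - Contain the char offset and length of each suspicious document sentence
--            src_gap <int> - Max gap between sentences to be consider adjacent in the source document
--            susp_gap <int> - Max gap between sentences to be consider adjacent in the suspicious document
--            src_size <int> - Minimum amount of sentences in a plagiarism case in the side of source document
--            susp_size <int> - Minimum amount of sentences in a plagiarism case in the side of suspicious document
--            side <0 or 1> 0: Suspicious document side, 1: Source document side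
--     OUTPUT: res <list of list of tuples (int, int)> - Contains the clusters
--     """
--     if side == 0:
--         max_gap = susp_gap
--         min_size = susp_size
--         offsets = susp_offsets
--     else:
--         max_gap = src_gap
--         min_size = src_size
--         offsets = src_offsets
--     res = []
--     ps.sort(key=lambda tup: tup[side])
--     sub_set = []
--     for pair in ps:
--         if len(sub_set) == 0:
--             sub_set.append(pair)
--         else:
--             if adjacent_sents(pair[side], sub_set[-1][side], max_gap):
--                 # if adjacent_chars(pair[side], sub_set[-1][side], offsets, max_gap):
--                 sub_set.append(pair)
--             else:
--                 if len(sub_set) >= min_size: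
--                     res.append(sub_set)
--                 sub_set = [pair]
--     if len(sub_set) >= min_size:
--         res.append(sub_set)
--     return res
-- ===== SOURCE B (Python) =====
-- def frag_founder(ps, src_offsets, susp_offsets, src_gap, susp_gap, src_size, susp_size, side):
--     if side == 0:
--         max_gap, min_size = susp_gap, susp_size
--     else:
--         max_gap, min_size = src_gap, src_size
--     ps.sort(key=lambda tup: tup[side])
--     n = len(ps)
--     bounds = [0] + [i for i in range(1, n)
--                     if abs(ps[i][side] - ps[i - 1][side]) - 1 > max_gap] + [n]
--     segs = [ps[a:b] for a, b in zip(bounds, bounds[1:])]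
--     return [seg for seg in segs if len(seg) >= min_size]
-- ===== Notes on version B (the rewrite author's own statement) =====
-- stated objective: idiomatic
-- what changed: B replaces A's accumulate-and-flush loop (sub_set/res with interleaved size filtering) by a pipeline: collect boundary indices where adjacent elements are too far apart, slice the sorted list at consecutive bounds, then filter the slices by min_size.
import Mathlib
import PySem

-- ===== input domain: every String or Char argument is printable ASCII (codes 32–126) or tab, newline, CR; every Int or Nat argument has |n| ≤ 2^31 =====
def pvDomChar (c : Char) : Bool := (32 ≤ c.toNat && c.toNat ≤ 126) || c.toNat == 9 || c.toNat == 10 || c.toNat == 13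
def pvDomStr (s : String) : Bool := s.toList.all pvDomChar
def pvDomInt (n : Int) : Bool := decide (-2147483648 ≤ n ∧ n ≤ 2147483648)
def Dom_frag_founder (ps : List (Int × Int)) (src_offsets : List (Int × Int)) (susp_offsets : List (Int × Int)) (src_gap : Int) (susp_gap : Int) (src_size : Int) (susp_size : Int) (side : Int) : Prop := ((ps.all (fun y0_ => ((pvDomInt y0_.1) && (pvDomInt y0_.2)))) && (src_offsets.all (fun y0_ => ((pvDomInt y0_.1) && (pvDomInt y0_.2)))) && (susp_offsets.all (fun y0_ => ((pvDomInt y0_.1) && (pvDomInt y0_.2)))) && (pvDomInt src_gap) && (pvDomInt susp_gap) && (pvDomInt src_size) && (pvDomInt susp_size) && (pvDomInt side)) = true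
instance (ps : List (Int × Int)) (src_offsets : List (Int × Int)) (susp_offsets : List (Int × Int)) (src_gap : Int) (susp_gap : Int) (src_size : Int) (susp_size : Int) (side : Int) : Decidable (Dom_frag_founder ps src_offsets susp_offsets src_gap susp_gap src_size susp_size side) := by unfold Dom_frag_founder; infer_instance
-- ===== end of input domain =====

-- B groups the sorted seeds by collecting boundary indices, slicing at consecutive bounds and
-- filtering the slices by min_size, instead of A's accumulate-and-flush loop (objective: idiomatic).
-- Both A and B sort `ps` in place via ps.sort(...); the equivalence proved here is about the return value.

-- ===== PORT A =====
-- tuple indexing p[side]; exact for side ∈ {-2,-1,0,1} (Pre_ excludes the sides where Python raises)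
def pairGet (p : Int × Int) (side : Int) : Int := PySem.List.pyGetD [p.1, p.2] side 0

def adjacent_sents (a : Int) (b : Int) (th : Int) : Bool :=
  if |a - b| - 1 ≤ th then true else false

-- the body of A's `for pair in ps` loop: state = (res, sub_set); sub_set[-1] via pyGetD, exact since
-- A only reads it when len(sub_set) ≠ 0
def stepA (side g ms : Int) (st : List (List (Int × Int)) × List (Int × Int)) (pair : Int × Int) :
    List (List (Int × Int)) × List (Int × Int) :=
  if st.2.length = 0 then (st.1, st.2 ++ [pair])
  else if adjacent_sents (pairGet pair side) (pairGet (PySem.List.pyGetD st.2 (-1) (0, 0)) side) g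
  then (st.1, st.2 ++ [pair])
  else if ms ≤ (st.2.length : Int) then (st.1 ++ [st.2], [pair])
  else (st.1, [pair])

def frag_founder (ps : List (Int × Int)) (src_offsets : List (Int × Int)) (susp_offsets : List (Int × Int)) (src_gap : Int) (susp_gap : Int) (src_size : Int) (susp_size : Int) (side : Int) : List (List (Int × Int)) :=
  let max_gap := if side = 0 then susp_gap else src_gap
  let min_size := if side = 0 then susp_size else src_size
  -- A also binds `offsets` (susp_offsets or src_offsets) but never uses it
  let sorted := PySem.List.sorted ps (fun tup => pairGet tup side)
  let st := sorted.foldl (stepA side max_gap min_size) ([], [])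
  if min_size ≤ (st.2.length : Int) then st.1 ++ [st.2] else st.1

-- ===== PORT B =====
-- the boundary test of Source B's comprehension: abs(ps[i][side] - ps[i-1][side]) - 1 > max_gap
-- (ps[i], ps[i-1] read through pyGetD; i is always in range here)
def boundaryB (side g : Int) (l : List (Int × Int)) (i : Int) : Bool :=
  decide (|pairGet (PySem.List.pyGetD l i (0, 0)) side - pairGet (PySem.List.pyGetD l (i - 1) (0, 0)) side| - 1 > g)

-- bounds = [0] + [i for i in range(1, n) if <boundary>] + [n];  segs = [l[a:b] for a, b in zip(bounds, bounds[1:])]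
def segsOf (side g : Int) (l : List (Int × Int)) : List (List (Int × Int)) :=
  let n : Int := (l.length : Int)
  let bounds : List Int := [0] ++ (PySem.List.pyRange 1 n 1).filter (boundaryB side g l) ++ [n]
  (bounds.zip bounds.tail).map (fun ab => PySem.List.slice l (some ab.1) (some ab.2))

def frag_founder_alt (ps : List (Int × Int)) (src_offsets : List (Int × Int)) (susp_offsets : List (Int × Int)) (src_gap : Int) (susp_gap : Int) (src_size : Int) (susp_size : Int) (side : Int) : List (List (Int × Int)) :=
  let max_gap := if side = 0 then susp_gap else src_gap
  let min_size := if side = 0 then susp_size else src_size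
  let sorted := PySem.List.sorted ps (fun tup => pairGet tup side)
  (segsOf side max_gap sorted).filter (fun seg => decide ((seg.length : Int) ≥ min_size))

-- ===== PRECONDITION & SPEC =====
-- Pre_ excludes exactly the inputs on which Python A raises IndexError: a nonempty ps with a side
-- outside {-2,-1,0,1} (tuple index out of range inside the sort key).
def Pre_frag_founder (ps : List (Int × Int)) (src_offsets : List (Int × Int)) (susp_offsets : List (Int × Int)) (src_gap : Int) (susp_gap : Int) (src_size : Int) (susp_size : Int) (side : Int) : Prop :=
  ps = [] ∨ side = 0 ∨ side = 1 ∨ side = -1 ∨ side = -2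
instance (ps : List (Int × Int)) (src_offsets : List (Int × Int)) (susp_offsets : List (Int × Int)) (src_gap : Int) (susp_gap : Int) (src_size : Int) (susp_size : Int) (side : Int) : Decidable (Pre_frag_founder ps src_offsets susp_offsets src_gap susp_gap src_size susp_size side) := by unfold Pre_frag_founder; infer_instance

def pvWitness_frag_founder : (List (Int × Int)) × (List (Int × Int)) × (List (Int × Int)) × Int × Int × Int × Int × Int :=
  ([(1, 2), (3, 4), (9, 1)], [], [], 1, 1, 1, 1, 0)

def Spec_frag_founder (ps : List (Int × Int)) (src_offsets : List (Int × Int)) (susp_offsets : List (Int × Int)) (src_gap : Int) (susp_gap : Int) (src_size : Int) (susp_size : Int) (side : Int) (out : List (List (Int × Int))) : Prop := out = frag_founder_alt ps src_offsets susp_offsets src_gap susp_gap src_size susp_size side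
instance (ps : List (Int × Int)) (src_offsets : List (Int × Int)) (susp_offsets : List (Int × Int)) (src_gap : Int) (susp_gap : Int) (src_size : Int) (susp_size : Int) (side : Int) (out : List (List (Int × Int))) : Decidable (Spec_frag_founder ps src_offsets susp_offsets src_gap susp_gap src_size susp_size side out) := by unfold Spec_frag_founder; infer_instance

-- ===== CLAIM (what is proved, stated in full; the proofs are below) =====
def Claim_equal_frag_founder : Prop := ∀ (ps : List (Int × Int)) (src_offsets : List (Int × Int)) (susp_offsets : List (Int × Int)) (src_gap : Int) (susp_gap : Int) (src_size : Int) (susp_size : Int) (side : Int), Dom_frag_founder ps src_offsets susp_offsets src_gap susp_gap src_size susp_size side → Pre_frag_founder ps src_offsets susp_offsets src_gap susp_gap src_size susp_size side → Spec_frag_founder ps src_offsets susp_offsets src_gap susp_gap src_size susp_size side (frag_founder ps src_offsets susp_offsets src_gap susp_gap src_size susp_size side)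

-- ===== LEMMAS AND PROOFS =====

theorem pvWitness_ok : Dom_frag_founder pvWitness_frag_founder.1 pvWitness_frag_founder.2.1 pvWitness_frag_founder.2.2.1 pvWitness_frag_founder.2.2.2.1 pvWitness_frag_founder.2.2.2.2.1 pvWitness_frag_founder.2.2.2.2.2.1 pvWitness_frag_founder.2.2.2.2.2.2.1 pvWitness_frag_founder.2.2.2.2.2.2.2 ∧ Pre_frag_founder pvWitness_frag_founder.1 pvWitness_frag_founder.2.1 pvWitness_frag_founder.2.2.1 pvWitness_frag_founder.2.2.2.1 pvWitness_frag_founder.2.2.2.2.1 pvWitness_frag_founder.2.2.2.2.2.1 pvWitness_frag_founder.2.2.2.2.2.2.1 pvWitness_frag_founder.2.2.2.2.2.2.2 := by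
  constructor <;> decide

theorem pyGetD_append_left {α : Type} (l : List α) (y : α) (i : Int) (d : α)
    (h0 : 0 ≤ i) (h1 : i < (l.length : Int)) :
    PySem.List.pyGetD (l ++ [y]) i d = PySem.List.pyGetD l i d := by
  rw [PySem.List.pyGetD_eq_getElem _ d h0 (by simp; omega),
      PySem.List.pyGetD_eq_getElem _ d h0 h1]
  exact List.getElem_append_left (by omega)

theorem slice_append_left {α : Type} (l : List α) (y : α) (a b : Int)
    (h0 : 0 ≤ a) (h1 : 0 ≤ b) (h2 : b ≤ (l.length : Int)) :
    PySem.List.slice (l ++ [y]) (some a) (some b) = PySem.List.slice l (some a) (some b) := by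
  rw [PySem.List.slice_toNat _ h0 h1, PySem.List.slice_toNat _ h0 h1]
  by_cases hle : a.toNat ≤ l.length
  case pos =>
    rw [List.drop_append_of_le_length hle]
    rw [List.take_append_of_le_length (by rw [List.length_drop]; omega)]
  case neg =>
    have hz : b.toNat - a.toNat = 0 := by omega
    simp [hz]

theorem slice_snoc_ext {α : Type} (l : List α) (y : α) (a : Int)
    (h0 : 0 ≤ a) (h2 : a ≤ (l.length : Int)) :
    PySem.List.slice (l ++ [y]) (some a) (some ((l.length : Int) + 1))
      = PySem.List.slice l (some a) (some (l.length : Int)) ++ [y] := by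
  rw [PySem.List.slice_toNat _ h0 (by omega), PySem.List.slice_toNat _ h0 (by omega)]
  rw [List.drop_append_of_le_length (by omega)]
  rw [List.take_of_length_le (by simp only [List.length_append, List.length_drop, List.length_cons, List.length_nil]; omega),
      List.take_of_length_le (by rw [List.length_drop]; omega)]

theorem slice_last_single {α : Type} (l : List α) (y : α) :
    PySem.List.slice (l ++ [y]) (some (l.length : Int)) (some ((l.length : Int) + 1)) = [y] := by
  rw [PySem.List.slice_toNat _ (by omega) (by omega)]
  rw [show ((l.length : Int)).toNat = l.length by omega, List.drop_left,
      show (((l.length : Int)) + 1).toNat - l.length = 1 by omega]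
  rfl

theorem zip_tail_append_singleton {α : Type} (xs : List α) (c : α) (h : xs ≠ []) :
    (xs ++ [c]).zip (xs ++ [c]).tail = xs.zip xs.tail ++ [(xs.getLast h, c)] := by
  induction xs with
  | nil => simp at h
  | cons x t ih =>
    cases t with
    | nil => simp
    | cons x' t' =>
      simp only [List.cons_append, List.tail_cons, List.zip_cons_cons]
      have h2 := ih (by simp)
      simp only [List.cons_append, List.tail_cons] at h2
      rw [h2]
      simp [List.getLast]

theorem zip_tail_append_singleton' {α : Type} (xs : List α) (c a : α) (h : xs ≠ [])
    (ha : xs.getLast h = a) :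
    (xs ++ [c]).zip (xs ++ [c]).tail = xs.zip xs.tail ++ [(a, c)] := by
  rw [zip_tail_append_singleton xs c h, ha]

theorem segs_nil (side g : Int) : segsOf side g [] = [[]] := by
  simp [segsOf, PySem.List.pyRange_one_eq_nil (by norm_num : (0:Int) ≤ 1), PySem.List.slice]

theorem segs_expand (side g : Int) (m : List (Int × Int)) :
    segsOf side g m =
      ((([0] ++ (PySem.List.pyRange 1 (m.length : Int) 1).filter (boundaryB side g m) ++ [(m.length : Int)]).zip
        ([0] ++ (PySem.List.pyRange 1 (m.length : Int) 1).filter (boundaryB side g m) ++ [(m.length : Int)]).tail).map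
        (fun ab : Int × Int => PySem.List.slice m (some ab.1) (some ab.2))) := rfl

theorem segs_snoc (side g : Int) (l : List (Int × Int)) (y : Int × Int)
    (S : List (List (Int × Int))) (s : List (Int × Int))
    (h : segsOf side g l = S ++ [s]) :
    segsOf side g (l ++ [y]) =
      if l ≠ [] ∧ g < |pairGet y side - pairGet (PySem.List.pyGetD l (-1) (0, 0)) side| - 1
      then (S ++ [s]) ++ [[y]]
      else S ++ [s ++ [y]] := by
  rcases eq_or_ne l [] with hl | hl
  · subst hl
    rw [segs_nil] at h
    have hS : S = [] ∧ s = [] := by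
      cases S with
      | nil => simpa using h.symm
      | cons a t => cases t <;> simp_all
    obtain ⟨rfl, rfl⟩ := hS
    simp only [ne_eq, not_true_eq_false, false_and, if_false, List.nil_append]
    show segsOf side g [y] = [[y]]
    simp [segsOf, PySem.List.pyRange_one_eq_nil (by norm_num : (1:Int) ≤ 1), PySem.List.slice]
  · have hn : 1 ≤ (l.length : Int) := by
      have := List.length_pos_of_ne_nil hl; omega
    set n : Int := (l.length : Int) with hn_def
    set F : List Int := (PySem.List.pyRange 1 n 1).filter (boundaryB side g l) with hF
    -- members of 0 :: F are in [0, n); members of F are in [1, n)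
    have hmemF : ∀ x ∈ F, 1 ≤ x ∧ x < n := by
      intro x hx
      exact PySem.List.mem_pyRange_one.mp (List.mem_of_mem_filter hx)
    have hmemA0 : ∀ x ∈ (0 :: F), 0 ≤ x ∧ x ≤ n := by
      intro x hx
      rcases List.mem_cons.mp hx with rfl | hx
      · exact ⟨le_refl 0, by omega⟩
      · have := hmemF x hx; omega
    -- the original segments, decomposed
    have hA0 : (0 :: F) ≠ [] := by simp
    have hsegs : segsOf side g l
        = ((0 :: F).zip (0 :: F).tail).map (fun ab : Int × Int => PySem.List.slice l (some ab.1) (some ab.2))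
          ++ [PySem.List.slice l (some ((0 :: F).getLast hA0)) (some n)] := by
      rw [segs_expand]
      have hb0 : [0] ++ F ++ [n] = (0 :: F) ++ [n] := by simp
      rw [hb0, zip_tail_append_singleton (0 :: F) n hA0, List.map_append]
      simp only [List.map_cons, List.map_nil]
    have hdecomp : S = ((0 :: F).zip (0 :: F).tail).map (fun ab : Int × Int => PySem.List.slice l (some ab.1) (some ab.2))
        ∧ s = PySem.List.slice l (some ((0 :: F).getLast hA0)) (some n) := by
      have := h.symm.trans hsegs
      have h2 := List.append_inj' this (by simp)
      exact ⟨h2.1, by simpa using h2.2⟩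
    obtain ⟨hSd, hsd⟩ := hdecomp
    subst hSd; subst hsd
    rw [segs_expand]
    have hc : ((l ++ [y]).length : Int) = n + 1 := by simp [hn_def]
    rw [hc]
    rw [PySem.List.pyRange_one_succ_right (by omega : (1:Int) ≤ n)]
    rw [List.filter_append]
    have hfilter : (PySem.List.pyRange 1 n 1).filter (boundaryB side g (l ++ [y])) = F := by
      rw [hF]
      refine List.filter_congr ?_
      intro i hi
      have hi' := PySem.List.mem_pyRange_one.mp hi
      simp only [boundaryB]
      rw [pyGetD_append_left l y i _ (by omega) (by omega),
          pyGetD_append_left l y (i - 1) _ (by omega) (by omega)]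
    rw [hfilter]
    have hlastget : PySem.List.pyGetD (l ++ [y]) n (0, 0) = y := by
      rw [PySem.List.pyGetD_eq_getElem _ _ (by omega) (by omega)]
      rw [List.getElem_append_right (show l.length ≤ n.toNat by omega)]
      have hi0 : n.toNat - l.length = 0 := by omega
      simp [hi0]
    have hprev : PySem.List.pyGetD (l ++ [y]) (n - 1) (0, 0) = PySem.List.pyGetD l (-1) (0, 0) := by
      rw [pyGetD_append_left l y (n - 1) _ (by omega) (by omega)]
      have h1 := PySem.List.pyGetD_neg_natCast l 1 ((0, 0) : Int × Int) (by omega) (by omega)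
      simp only [Nat.cast_one] at h1
      rw [h1]
      rw [PySem.List.pyGetD_eq_getElem l _ (by omega) (by omega)]
      congr 1
      omega
    have hmapS : ((0 :: F).zip (0 :: F).tail).map (fun ab : Int × Int => PySem.List.slice (l ++ [y]) (some ab.1) (some ab.2))
        = ((0 :: F).zip (0 :: F).tail).map (fun ab : Int × Int => PySem.List.slice l (some ab.1) (some ab.2)) := by
      refine List.map_congr_left ?_
      rintro ⟨a, b⟩ hab
      have hmem := List.of_mem_zip hab
      have hb' := hmemF b (by simpa using hmem.2)
      have ha' := hmemA0 a hmem.1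
      exact slice_append_left l y a b ha'.1 (by omega) (by omega)
    have haStar := hmemA0 _ (List.getLast_mem hA0)
    by_cases hB : g < |pairGet y side - pairGet (PySem.List.pyGetD l (-1) (0, 0)) side| - 1
    · have hfsing : List.filter (boundaryB side g (l ++ [y])) [n] = [n] := by
        simp [List.filter_cons, boundaryB, hlastget, hprev, hB]
      rw [hfsing]
      have hb2 : ([0] : List Int) ++ (F ++ [n]) ++ [n + 1] = ((0 :: F) ++ [n]) ++ [n + 1] := by simp
      rw [hb2]
      rw [zip_tail_append_singleton' ((0 :: F) ++ [n]) (n + 1) n (by simp)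
            (by exact List.getLast_concat)]
      rw [zip_tail_append_singleton (0 :: F) n hA0]
      rw [List.map_append, List.map_append]
      rw [hmapS]
      simp only [List.map_cons, List.map_nil]
      rw [slice_append_left l y _ n haStar.1 (by omega) (by omega)]
      have hyy : PySem.List.slice (l ++ [y]) (some n) (some (n + 1)) = [y] := by
        rw [hn_def]; exact slice_last_single l y
      rw [hyy]
      simp [hl, hB]
    · have hfsing : List.filter (boundaryB side g (l ++ [y])) [n] = [] := by
        simp [List.filter_cons, boundaryB, hlastget, hprev, hB]
      rw [hfsing]
      have hb2 : ([0] : List Int) ++ (F ++ []) ++ [n + 1] = (0 :: F) ++ [n + 1] := by simp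
      rw [hb2]
      rw [zip_tail_append_singleton (0 :: F) (n + 1) hA0]
      rw [List.map_append, hmapS]
      simp only [List.map_cons, List.map_nil]
      have hext : PySem.List.slice (l ++ [y]) (some ((0 :: F).getLast hA0)) (some (n + 1))
          = PySem.List.slice l (some ((0 :: F).getLast hA0)) (some n) ++ [y] := by
        rw [hn_def]
        exact slice_snoc_ext l y _ haStar.1 (by rw [← hn_def]; exact haStar.2)
      rw [hext]
      simp [hB]

theorem main_inv (side g ms : Int) (l : List (Int × Int)) :
    ∃ S s, segsOf side g l = S ++ [s]
      ∧ l.foldl (stepA side g ms) ([], []) = (S.filter (fun r => decide (ms ≤ (r.length : Int))), s)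
      ∧ (l ≠ [] → s ≠ [] ∧ PySem.List.pyGetD s (-1) (0, 0) = PySem.List.pyGetD l (-1) (0, 0)) := by
  induction l using List.reverseRecOn with
  | nil => exact ⟨[], [], by simp [segs_nil], by simp, by simp⟩
  | append_singleton l y ih =>
    obtain ⟨S, s, hseg, hfold, hlast⟩ := ih
    rw [List.foldl_append, hfold]
    simp only [List.foldl_cons, List.foldl_nil]
    rcases eq_or_ne l [] with hl | hl
    · subst hl
      rw [segs_nil] at hseg
      have hS : S = [] ∧ s = [] := by
        cases S with
        | nil => simpa using hseg.symm
        | cons a t => cases t <;> simp_all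
      obtain ⟨rfl, rfl⟩ := hS
      refine ⟨[], [y], ?_, ?_, fun _ => ⟨by simp, rfl⟩⟩
      · rw [segs_snoc side g [] y [] [] (by simp [segs_nil])]
        simp
      · simp [stepA]
    · have hs := hlast hl
      by_cases hB : g < |pairGet y side - pairGet (PySem.List.pyGetD l (-1) (0, 0)) side| - 1
      · -- boundary: y starts a new segment
        have h0 : ¬(s.length = 0) := by simpa [List.length_eq_zero_iff] using hs.1
        have hadj : ¬(|pairGet y side - pairGet (PySem.List.pyGetD l (-1) (0, 0)) side| - 1 ≤ g) := by omega
        refine ⟨S ++ [s], [y], ?_, ?_, fun _ => ⟨by simp, by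
          rw [PySem.List.pyGetD_neg_one_append_singleton]; rfl⟩⟩
        · rw [segs_snoc side g l y S s hseg, if_pos ⟨hl, hB⟩]
        · simp only [stepA, adjacent_sents, hs.2, h0, if_false, hadj]
          rw [List.filter_append]
          simp only [List.filter_cons, List.filter_nil]
          split_ifs <;> simp_all <;> omega
      · -- adjacent: y extends the last segment
        have h0 : ¬(s.length = 0) := by simpa [List.length_eq_zero_iff] using hs.1
        have hadj : |pairGet y side - pairGet (PySem.List.pyGetD l (-1) (0, 0)) side| - 1 ≤ g := by omega
        refine ⟨S, s ++ [y], ?_, ?_, fun _ => ⟨by simp, by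
          rw [PySem.List.pyGetD_neg_one_append_singleton, PySem.List.pyGetD_neg_one_append_singleton]⟩⟩
        · rw [segs_snoc side g l y S s hseg, if_neg (by tauto)]
        · simp only [stepA, adjacent_sents, hs.2, h0, if_false, hadj, if_true]

theorem core_eq (side g ms : Int) (l : List (Int × Int)) :
    (let st := l.foldl (stepA side g ms) ([], []);
     if ms ≤ (st.2.length : Int) then st.1 ++ [st.2] else st.1)
    = (segsOf side g l).filter (fun seg => decide ((seg.length : Int) ≥ ms)) := by
  obtain ⟨S, s, hseg, hfold, -⟩ := main_inv side g ms l
  simp only [hfold, hseg, List.filter_append, List.filter_cons, List.filter_nil, ge_iff_le]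
  split_ifs <;> simp_all <;> omega

-- ===== VERDICT (by name: the statement is the Claim_ definition above) =====
theorem frag_founder_spec : Claim_equal_frag_founder := by
  intro ps src_offsets susp_offsets src_gap susp_gap src_size susp_size side _ _
  unfold Spec_frag_founder frag_founder frag_founder_alt
  exact core_eq side _ _ _
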